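-- pv_equiv track=rewrite | github.com/21CHAPPiE/04241 | HuadongCode/app/core/data_loading.py | _select_column
-- ===== SOURCE A (Python) =====
-- from typing import Any, Mapping, Sequence
--
-- def _normalize_key(text: str) -> str:
--     return text.strip().lower().replace(" ", "_")
--
-- def _select_column(
--     field_names: Sequence[str],
--     aliases: Sequence[str],
--     explicit_name: str | None = None,
-- ) -> str | None:
--     if explicit_name is not None and explicit_name in field_names:
--         return explicit_name
--     normalized = {_normalize_key(name): name for name in field_names}
--     for alias in aliases:
--         match = normalized.get(_normalize_key(alias))
--         if match is not None:
--             return match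
--     return None
-- ===== SOURCE B (Python) =====
-- def _normalize_key(text):
--     return text.strip().lower().replace(" ", "_")
--
--
-- def _select_column(field_names, aliases, explicit_name=None):
--     if explicit_name is not None and explicit_name in field_names:
--         return explicit_name
--     # Loop inversion: rank each alias key by first occurrence, then make ONE
--     # pass over field_names choosing the field with the minimal alias rank
--     # (later field wins ties, matching dict-overwrite semantics of A).
--     rank = {}
--     for i, alias in enumerate(aliases):
--         rank.setdefault(_normalize_key(alias), i)
--     best = None
--     for name in field_names:
--         r = rank.get(_normalize_key(name))
--         if r is not None and (best is None or r <= best[0]):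
--             best = (r, name)
--     return None if best is None else best[1]
-- ===== Notes on version B (the rewrite author's own statement) =====
-- stated objective: alternative
-- what changed: B inverts the loops: instead of A's alias-outer lookup into a field-normalization dict, B first ranks each alias key by its first index, then makes one pass over field_names selecting the field with the minimal alias rank (later field wins ties, reproducing dict-overwrite semantics).
import Mathlib
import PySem

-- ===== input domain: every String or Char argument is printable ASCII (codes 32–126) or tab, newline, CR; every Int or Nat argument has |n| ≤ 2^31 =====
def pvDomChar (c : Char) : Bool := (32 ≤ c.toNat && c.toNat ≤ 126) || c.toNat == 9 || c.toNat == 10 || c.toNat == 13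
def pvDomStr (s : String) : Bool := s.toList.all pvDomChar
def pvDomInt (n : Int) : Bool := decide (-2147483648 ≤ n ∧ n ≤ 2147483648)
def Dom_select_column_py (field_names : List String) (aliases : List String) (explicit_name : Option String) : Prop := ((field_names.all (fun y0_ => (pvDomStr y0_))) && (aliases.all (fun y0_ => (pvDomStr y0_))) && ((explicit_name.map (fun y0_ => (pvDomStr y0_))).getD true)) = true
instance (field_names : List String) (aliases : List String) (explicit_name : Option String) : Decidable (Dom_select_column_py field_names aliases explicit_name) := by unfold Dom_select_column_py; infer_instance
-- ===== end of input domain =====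

-- B inverts A's loops: it ranks each alias key by first occurrence, then picks in one
-- pass over field_names the field of minimal alias rank (later field wins ties);
-- an alternative algorithm with the same return value.

-- _normalize_key: text.strip().lower().replace(" ", "_")
def normalizeKey (text : String) : String :=
  PySem.Str.replace (PySem.Str.lower (PySem.Str.strip text)) " " "_"

-- ===== PORT A =====
-- the 'for alias in aliases' loop over the precomputed dict
def selectLoopA (normalized : PySem.Dict String String) : List String → Option String
  | [] => none
  | al1 :: rest =>
    match normalized.get? (normalizeKey al1) with
    | some m => some m
    | none => selectLoopA normalized rest

def select_column_py (field_names : List String) (aliases : List String) (explicit_name : Option String) : Option String :=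
  if (explicit_name.map (fun e => field_names.contains e)).getD false then
    explicit_name
  else
    let normalized := field_names.foldl (fun d name => d.insert (normalizeKey name) name) PySem.Dict.empty
    selectLoopA normalized aliases

-- ===== PORT B =====
-- rank = {}; for i, alias in enumerate(aliases): rank.setdefault(_normalize_key(alias), i)
def buildRank (aliases : List String) : PySem.Dict String Int :=
  (PySem.List.enumerate aliases).foldl (fun d p => d.setdefault (normalizeKey p.2) p.1) PySem.Dict.empty

-- body of the 'for name in field_names' loop tracking best = (rank, name)
def bestStep (rank : PySem.Dict String Int) (b : Option (Int × String)) (name : String) : Option (Int × String) :=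
  match rank.get? (normalizeKey name) with
  | some rr =>
    match b with
    | none => some (rr, name)
    | some (br, _) => if rr ≤ br then some (rr, name) else b
  | none => b

def select_column_py_alt (field_names : List String) (aliases : List String) (explicit_name : Option String) : Option String :=
  if (explicit_name.map (fun e => field_names.contains e)).getD false then
    explicit_name
  else
    match field_names.foldl (bestStep (buildRank aliases)) none with
    | none => none
    | some (_, nm) => some nm

-- ===== PRECONDITION & SPEC =====
def Spec_select_column_py (field_names : List String) (aliases : List String) (explicit_name : Option String) (out : Option String) : Prop := out = select_column_py_alt field_names aliases explicit_name
instance (field_names : List String) (aliases : List String) (explicit_name : Option String) (out : Option String) : Decidable (Spec_select_column_py field_names aliases explicit_name out) := by unfold Spec_select_column_py; infer_instance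

-- ===== CLAIM (what is proved, stated in full; the proofs are below) =====
def Claim_equal_select_column_py : Prop := ∀ (field_names : List String) (aliases : List String) (explicit_name : Option String), Dom_select_column_py field_names aliases explicit_name → Spec_select_column_py field_names aliases explicit_name (select_column_py field_names aliases explicit_name)

-- ===== LEMMAS AND PROOFS =====

-- the last field whose normalized key is k (proof-side reference function)
def lastMatch (k : String) (fn : List String) : Option String :=
  fn.foldl (fun c n => if normalizeKey n = k then some n else c) none

-- reference alias loop: first alias with a match, answered by the last matching field
def selectLoopB (fn : List String) : List String → Option String
  | [] => none
  | a :: rest =>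
    match lastMatch (normalizeKey a) fn with
    | some c => some c
    | none => selectLoopB fn rest

-- bestStep with an abstract rank function (bestStep rank = bestStepF rank.get?)
def bestStepF (r : String → Option Int) (b : Option (Int × String)) (name : String) : Option (Int × String) :=
  match r (normalizeKey name) with
  | some rr =>
    match b with
    | none => some (rr, name)
    | some (br, _) => if rr ≤ br then some (rr, name) else b
  | none => b

-- first alias rank of key q among enumerate al s
def firstRank (al : List String) (s : Int) (q : String) : Option Int :=
  ((PySem.List.enumerate al s).find? (fun p => normalizeKey p.2 == q)).map (·.1)

-- A-side: lookup in A's dict = last-match scan of field_names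
theorem get?_foldl_insert_eq_scan (fn : List String) (k : String) (d : PySem.Dict String String) :
    (fn.foldl (fun d name => d.insert (normalizeKey name) name) d).get? k
      = fn.foldl (fun chosen name => if normalizeKey name = k then some name else chosen) (d.get? k) := by
  induction fn generalizing d with
  | nil => rfl
  | cons name rest ih =>
    have h2 : (d.insert (normalizeKey name) name).get? k
        = if normalizeKey name = k then some name else d.get? k := by
      rw [PySem.Dict.get?_insert]
      by_cases h : normalizeKey name = k
      · rw [if_pos h, if_pos h.symm]
      · rw [if_neg h, if_neg (Ne.symm h)]
    rw [List.foldl_cons, List.foldl_cons, ih, h2]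

theorem loopA_eq_loopB (fn : List String) (al : List String) :
    selectLoopA (fn.foldl (fun d name => d.insert (normalizeKey name) name) PySem.Dict.empty) al
      = selectLoopB fn al := by
  induction al with
  | nil => rfl
  | cons a rest ih =>
    simp only [selectLoopA, selectLoopB, lastMatch]
    rw [get?_foldl_insert_eq_scan fn (normalizeKey a) PySem.Dict.empty,
      PySem.Dict.get?_empty, ih]

theorem bestStep_eq (rank : PySem.Dict String Int) :
    bestStep rank = bestStepF (fun q => rank.get? q) := rfl

-- B-side: the setdefault loop keeps the FIRST rank for each key
theorem get?_rankFold (l : List (Int × String)) (d : PySem.Dict String Int) (q : String) :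
    (l.foldl (fun d p => d.setdefault (normalizeKey p.2) p.1) d).get? q
      = (d.get? q).or ((l.find? (fun p => normalizeKey p.2 == q)).map (·.1)) := by
  induction l generalizing d with
  | nil =>
    rw [List.foldl_nil, List.find?_nil]
    cases d.get? q <;> rfl
  | cons p rest ih =>
    rw [List.foldl_cons, ih]
    by_cases h : normalizeKey p.2 = q
    · rw [List.find?_cons_of_pos (by simpa using h)]
      subst h
      rw [PySem.Dict.get?_setdefault_self]
      cases d.get? (normalizeKey p.2) <;> rfl
    · rw [List.find?_cons_of_neg (by simpa using h),
        PySem.Dict.get?_setdefault_of_ne _ _ (Ne.symm h)]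

theorem rank_get (al : List String) (q : String) :
    (buildRank al).get? q = firstRank al 0 q := by
  unfold buildRank firstRank
  rw [get?_rankFold, PySem.Dict.get?_empty]
  rfl

theorem firstRank_cons (a : String) (rest : List String) (s : Int) (q : String) :
    firstRank (a :: rest) s q
      = if normalizeKey a = q then some s else firstRank rest (s + 1) q := by
  unfold firstRank
  rw [PySem.List.enumerate_cons]
  by_cases h : normalizeKey a = q
  · rw [List.find?_cons_of_pos (by simpa using h), if_pos h]
    rfl
  · rw [List.find?_cons_of_neg (by simpa using h), if_neg h]

theorem firstRank_shift (rest : List String) (s : Int) (q : String) :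
    firstRank rest (s + 1) q = (firstRank rest s q).map (· + 1) := by
  induction rest generalizing s with
  | nil => rfl
  | cons b r ih =>
    rw [firstRank_cons, firstRank_cons]
    by_cases h : normalizeKey b = q
    · rw [if_pos h, if_pos h]; rfl
    · rw [if_neg h, if_neg h, ih (s + 1)]

theorem firstRank_nonneg (al : List String) (s : Int) (q : String) (j : Int)
    (h : firstRank al s q = some j) : s ≤ j := by
  induction al generalizing s with
  | nil => simp [firstRank, PySem.List.enumerate_nil] at h
  | cons a rest ih =>
    rw [firstRank_cons] at h
    by_cases ha : normalizeKey a = q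
    · rw [if_pos ha] at h
      simp at h
      omega
    · rw [if_neg ha] at h
      have := ih (s + 1) h
      omega

-- ranks produced by the fold are values of r', hence nonnegative
theorem foldB_acc_nonneg (fn : List String) (r' : String → Option Int)
    (hnn : ∀ q j, r' q = some j → 0 ≤ j) (b : Option (Int × String))
    (hb : ∀ p, b = some p → 0 ≤ p.1) :
    ∀ p, fn.foldl (bestStepF r') b = some p → 0 ≤ p.1 := by
  induction fn generalizing b with
  | nil => exact hb
  | cons n rest ih =>
    rw [List.foldl_cons]
    apply ih
    intro p hp
    unfold bestStepF at hp
    cases hrx : r' (normalizeKey n) with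
    | none =>
      rw [hrx] at hp
      exact hb p hp
    | some rr =>
      rw [hrx] at hp
      cases b with
      | none =>
        dsimp only at hp
        injection hp with h
        rw [← h]
        exact hnn _ _ hrx
      | some q =>
        obtain ⟨br, nm⟩ := q
        dsimp only at hp
        split_ifs at hp
        · injection hp with h
          rw [← h]
          exact hnn _ _ hrx
        · exact hb p hp

-- a rank function that matches nothing leaves the accumulator alone
theorem foldB_none (fn : List String) (r : String → Option Int)
    (h : ∀ q, r q = none) (b : Option (Int × String)) :
    fn.foldl (bestStepF r) b = b := by
  induction fn generalizing b with
  | nil => rfl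
  | cons n rest ih =>
    rw [List.foldl_cons]
    have : bestStepF r b n = b := by unfold bestStepF; rw [h]
    rw [this, ih]

-- core loop-inversion lemma: peeling the first alias off the rank function
theorem foldB_shift (fn : List String) (k : String) (r r' : String → Option Int)
    (hr : ∀ q, r q = if q = k then some 0 else (r' q).map (· + 1))
    (hnn : ∀ q j, r' q = some j → 0 ≤ j) :
    fn.foldl (bestStepF r) none
      = match lastMatch k fn with
        | some c => some ((0 : Int), c)
        | none => (fn.foldl (bestStepF r') none).map (fun p => (p.1 + 1, p.2)) := by
  induction fn using List.reverseRecOn with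
  | nil => rfl
  | append_singleton fn x ih =>
    have hlm : lastMatch k (fn ++ [x])
        = if normalizeKey x = k then some x else lastMatch k fn := by
      unfold lastMatch
      rw [List.foldl_append, List.foldl_cons, List.foldl_nil]
    rw [List.foldl_append, List.foldl_cons, List.foldl_nil, ih, hlm]
    rw [List.foldl_append, List.foldl_cons, List.foldl_nil]
    by_cases hx : normalizeKey x = k
    · rw [if_pos hx]
      cases hLM : lastMatch k fn with
      | some c => simp [bestStepF, hr, hx]
      | none =>
        cases hB : fn.foldl (bestStepF r') none with
        | none => simp [bestStepF, hr, hx]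
        | some p =>
          obtain ⟨j', n'⟩ := p
          have hj' : 0 ≤ j' :=
            foldB_acc_nonneg fn r' hnn none (by intro p hp; cases hp) (j', n') hB
          simp only [Option.map_some, bestStepF, hr, if_pos hx]
          rw [if_pos (by omega : (0:Int) ≤ j' + 1)]
    · rw [if_neg hx]
      cases hLM : lastMatch k fn with
      | some c =>
        cases hrx : r' (normalizeKey x) with
        | none => simp [bestStepF, hr, hx, hrx]
        | some j =>
          have hj := hnn _ _ hrx
          simp only [bestStepF, hr, if_neg hx, hrx, Option.map_some]
          rw [if_neg (by omega : ¬ (j + 1 ≤ (0:Int)))]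
      | none =>
        cases hB : fn.foldl (bestStepF r') none with
        | none =>
          simp only [Option.map_none, bestStepF, hr, if_neg hx]
          cases hrx : r' (normalizeKey x) <;> simp
        | some p =>
          obtain ⟨j', n'⟩ := p
          simp only [Option.map_some, bestStepF, hr, if_neg hx]
          cases hrx : r' (normalizeKey x) with
          | none => simp
          | some j =>
            simp only [Option.map_some]
            by_cases hle : j ≤ j'
            · rw [if_pos (by omega : j + 1 ≤ j' + 1), if_pos hle]
              rfl
            · rw [if_neg (by omega : ¬ (j + 1 ≤ j' + 1)), if_neg hle]
              rfl

theorem foldB_eq_selectLoopB (fn : List String) (al : List String) :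
    (fn.foldl (bestStepF (fun q => (buildRank al).get? q)) none).map (·.2)
      = selectLoopB fn al := by
  induction al with
  | nil =>
    rw [foldB_none]
    · rfl
    · intro q; rw [rank_get]; rfl
  | cons a rest ih =>
    have hr : ∀ q, (buildRank (a :: rest)).get? q
        = if q = normalizeKey a then some 0 else ((buildRank rest).get? q).map (· + 1) := by
      intro q
      rw [rank_get, firstRank_cons, firstRank_shift, ← rank_get]
      by_cases h : normalizeKey a = q
      · rw [if_pos h, if_pos h.symm]
      · rw [if_neg h, if_neg (Ne.symm h)]
    have hnn : ∀ q j, (buildRank rest).get? q = some j → 0 ≤ j := by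
      intro q j h
      rw [rank_get] at h
      exact firstRank_nonneg rest 0 q j h
    rw [foldB_shift fn (normalizeKey a) _ _ hr hnn]
    show _ = selectLoopB fn (a :: rest)
    simp only [selectLoopB]
    cases lastMatch (normalizeKey a) fn with
    | some c => rfl
    | none =>
      rw [Option.map_map, ← ih]
      rfl

-- ===== VERDICT (by name: the statement is the Claim_ definition above) =====
theorem select_column_py_spec : Claim_equal_select_column_py := by
  intro fn al ex _
  unfold Spec_select_column_py select_column_py select_column_py_alt
  split_ifs with h
  · rfl
  · rw [loopA_eq_loopB fn al, ← foldB_eq_selectLoopB fn al, ← bestStep_eq]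
    cases fn.foldl (bestStep (buildRank al)) none with
    | none => rfl
    | some p => cases p; rfl
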